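-- pv_equiv track=rewrite | github.com/jkim117/IWSpring2020 | DNS_Netassay/PaperResults/combined_sim_v3_3hr.py | matchDomain
-- ===== SOURCE A (Python) =====
-- def matchDomain(known, domain):
--     knownparts = known.split('.')
--     domainparts = domain.split('.')
--     if len(knownparts) != len(domainparts):
--         return False
--
--     for i in range(0, len(knownparts)):
--         if (knownparts[i] == '*'):
--             continue
--         if (knownparts[i] != domainparts[i]):
--             return False
--     return True
-- ===== SOURCE B (Python) =====
-- def matchDomain(known, domain):
--     # Single left-to-right character scan of both strings (no splitting into
--     # label lists): a '*' that forms a whole label in `known` skips the current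
--     # domain label; otherwise characters must match exactly ('.' included).
--     i = j = 0
--     nk, nd = len(known), len(domain)
--     start = True  # at the beginning of a label in `known`
--     while i < nk:
--         c = known[i]
--         if start and c == '*' and (i + 1 == nk or known[i + 1] == '.'):
--             p = domain.find('.', j)
--             if i + 1 == nk:
--                 return p == -1
--             if p == -1:
--                 return False
--             i += 2
--             j = p + 1
--             start = True
--             continue
--         if j >= nd or c != domain[j]:
--             return False
--         start = c == '.'
--         i += 1
--         j += 1
--     return j >= nd
-- ===== Notes on version B (the rewrite author's own statement) =====
-- stated objective: alternative
-- what changed: Replaced the split-into-label-lists plus indexed loop by a single left-to-right character scan of both strings that consumes a whole domain label (find('.')) when it meets a whole-label '*' in known; no intermediate lists are built.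
import Mathlib
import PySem

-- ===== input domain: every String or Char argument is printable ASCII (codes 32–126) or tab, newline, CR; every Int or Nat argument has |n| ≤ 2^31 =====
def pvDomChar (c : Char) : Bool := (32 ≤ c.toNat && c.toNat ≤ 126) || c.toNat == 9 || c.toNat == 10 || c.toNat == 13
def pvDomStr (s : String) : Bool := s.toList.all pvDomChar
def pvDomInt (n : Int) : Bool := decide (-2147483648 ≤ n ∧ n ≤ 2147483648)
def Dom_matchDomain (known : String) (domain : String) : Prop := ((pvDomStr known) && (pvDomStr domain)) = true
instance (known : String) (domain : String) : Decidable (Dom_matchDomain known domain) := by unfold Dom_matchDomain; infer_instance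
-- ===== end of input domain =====

-- B replaces A's split-into-label-lists + indexed loop by a single character scan
-- of both strings (alternative decomposition, no intermediate lists).


-- ===== PORT A =====
-- the 'for i in range(0, len(knownparts))' loop with its continue / early-return branches
def matchDomainLoop (kp dp : List (List Char)) (i : Nat) : Bool :=
  if i < kp.length then
    if kp.getD i [] == ['*'] then matchDomainLoop kp dp (i + 1)
    else if kp.getD i [] != dp.getD i [] then false
    else matchDomainLoop kp dp (i + 1)
  else true
termination_by kp.length - i

def matchDomain (known : String) (domain : String) : Bool :=
  let knownparts := PySem.Chars.splitOn known.toList ['.']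
  let domainparts := PySem.Chars.splitOn domain.toList ['.']
  if knownparts.length ≠ domainparts.length then false
  else matchDomainLoop knownparts domainparts 0

-- ===== PORT B =====
-- Source B's while loop as tail recursion over the remaining suffixes of the two
-- strings; `start` = we are at the beginning of a label of `known`.
-- domain.find('.', j) followed by jumping past it is expressed on the current
-- suffix as dropWhile (· != '.') (exact: the first '.' at or after position j).
def scanB (start : Bool) (k d : List Char) : Bool :=
  match k with
  | [] => d.isEmpty
  | c :: ks =>
    if start && c == '*' && (ks.isEmpty || ks.head? == some '.') then
      match ks with
      | [] => !(d.contains '.')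
      | _ :: ks' =>
        match d.dropWhile (· != '.') with
        | [] => false
        | _ :: d' => scanB true ks' d'
    else
      match d with
      | [] => false
      | c' :: d' => if c == c' then scanB (c == '.') ks d' else false

def matchDomain_alt (known : String) (domain : String) : Bool :=
  scanB true known.toList domain.toList

-- ===== PRECONDITION & SPEC =====
def Spec_matchDomain (known : String) (domain : String) (out : Bool) : Prop := out = matchDomain_alt known domain
instance (known : String) (domain : String) (out : Bool) : Decidable (Spec_matchDomain known domain out) := by unfold Spec_matchDomain; infer_instance

-- ===== CLAIM (what is proved, stated in full; the proofs are below) =====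
def Claim_equal_matchDomain : Prop := ∀ (known : String) (domain : String), Dom_matchDomain known domain → Spec_matchDomain known domain (matchDomain known domain)

-- ===== LEMMAS AND PROOFS =====

-- reference splitting of a char list on '.'
def splitDot : List Char → List (List Char)
  | [] => [[]]
  | c :: r =>
    if c = '.' then [] :: splitDot r
    else (c :: (splitDot r).headI) :: (splitDot r).tail

-- reference label-wise matcher both ports are reduced to
def specMatch : List (List Char) → List (List Char) → Bool
  | [], [] => true
  | kl :: kr, dl :: dr => (kl == ['*'] || kl == dl) && specMatch kr dr
  | _, _ => false

theorem splitDot_nil : splitDot [] = [[]] := rfl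

theorem splitDot_dot (r : List Char) : splitDot ('.' :: r) = [] :: splitDot r := by
  simp [splitDot]

theorem splitDot_ne_nil (s : List Char) : splitDot s ≠ [] := by
  cases s with
  | nil => simp [splitDot]
  | cons c r => by_cases hc : c = '.' <;> simp [splitDot, hc]

theorem splitDot_cons {c : Char} (hc : c ≠ '.') (r : List Char) :
    splitDot (c :: r) = (c :: (splitDot r).headI) :: (splitDot r).tail := by
  simp [splitDot, hc]

theorem splitDot_eta (s : List Char) :
    splitDot s = (splitDot s).headI :: (splitDot s).tail := by
  cases h : splitDot s with
  | nil => exact absurd h (splitDot_ne_nil s)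
  | cons a t => simp

theorem splitDot_headI (s : List Char) :
    (splitDot s).headI = s.takeWhile (· ≠ '.') := by
  induction s with
  | nil => rfl
  | cons c r ih =>
    by_cases hc : c = '.'
    · subst hc; simp [splitDot_dot, List.takeWhile_cons]
    · simp [splitDot_cons hc, List.takeWhile_cons, hc, ih]

theorem splitDot_tail (s : List Char) :
    (splitDot s).tail = (match s.dropWhile (· ≠ '.') with
                         | [] => []
                         | _ :: r => splitDot r) := by
  induction s with
  | nil => rfl
  | cons c r ih =>
    by_cases hc : c = '.'
    · subst hc; simp [splitDot_dot, List.dropWhile_cons]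
    · simp [splitDot_cons hc, List.dropWhile_cons, hc, ih]

-- ---------- A-side ----------

theorem specMatch_ne_length {a b : List (List Char)} (h : a.length ≠ b.length) :
    specMatch a b = false := by
  induction a generalizing b with
  | nil => cases b with
    | nil => simp at h
    | cons _ _ => rfl
  | cons x xs ih =>
    cases b with
    | nil => rfl
    | cons y ys =>
      have hh : xs.length ≠ ys.length := by simp only [List.length_cons] at h; omega
      simp [specMatch, ih hh]

theorem loop_eq_spec (kp dp : List (List Char)) (hlen : kp.length = dp.length) :
    ∀ i, matchDomainLoop kp dp i = specMatch (kp.drop i) (dp.drop i) := by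
  intro i
  induction hn : kp.length - i using Nat.strong_induction_on generalizing i with
  | _ n ih =>
  rw [matchDomainLoop]
  by_cases hi : i < kp.length
  · have hid : i < dp.length := hlen ▸ hi
    have hdk : kp.drop i = kp[i] :: kp.drop (i + 1) := (List.drop_eq_getElem_cons hi).symm ▸ rfl
    have hdd : dp.drop i = dp[i] :: dp.drop (i + 1) := (List.drop_eq_getElem_cons hid).symm ▸ rfl
    have hrec : matchDomainLoop kp dp (i + 1) = specMatch (kp.drop (i + 1)) (dp.drop (i + 1)) :=
      ih (kp.length - (i + 1)) (by omega) (i + 1) rfl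
    have hgk : kp.getD i [] = kp[i] := List.getD_eq_getElem kp [] hi
    have hgd : dp.getD i [] = dp[i] := List.getD_eq_getElem dp [] hid
    rw [hdk, hdd]
    simp only [hi, if_true, hgk, hgd, specMatch, hrec]
    by_cases h1 : kp[i] = ['*']
    · simp [h1]
    · by_cases h2 : kp[i] = dp[i] <;> simp [h1, h2]
  · have h2 : ¬ i < dp.length := by omega
    rw [List.drop_eq_nil_of_le (by omega), List.drop_eq_nil_of_le (by omega)]
    simp [hi, specMatch]

-- Chars.splitOn with separator "." is splitDot
theorem splitOn_go_eq (fuel : Nat) :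
    ∀ (s cur : List Char) (accs : List (List Char)), s.length < fuel →
    PySem.Chars.splitOn.go ['.'] fuel s cur accs
      = accs.reverse ++ (cur.reverse ++ (splitDot s).headI) :: (splitDot s).tail := by
  induction fuel with
  | zero => intro s cur accs h; omega
  | succ f ih =>
    intro s cur accs h
    cases s with
    | nil =>
      simp [PySem.Chars.splitOn.go, splitDot_nil]
    | cons c rest =>
      rw [PySem.Chars.splitOn.go]
      by_cases hc : c = '.'
      · subst hc
        have hp : ['.'].isPrefixOf ('.' :: rest) = true := by simp [List.isPrefixOf]
        rw [if_pos hp]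
        have hd : List.drop ['.'].length ('.' :: rest) = rest := rfl
        rw [hd]
        simp only [List.length_cons] at h
        rw [ih rest [] (cur.reverse :: accs) (by omega)]
        simp [splitDot_dot, ← splitDot_eta]
      · have hp : ['.'].isPrefixOf (c :: rest) = false := by
          have hb : ('.' == c) = false := beq_eq_false_iff_ne.mpr fun hcc => hc hcc.symm
          simp [List.isPrefixOf, hb]
        rw [if_neg (by simp [hp])]
        simp only [List.length_cons] at h
        rw [ih rest (c :: cur) accs (by omega)]
        rw [splitDot_cons hc]
        simp

theorem splitOn_eq_splitDot (s : List Char) :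
    PySem.Chars.splitOn s ['.'] = splitDot s := by
  show PySem.Chars.splitOn.go ['.'] (s.length + 1) s [] [] = splitDot s
  rw [splitOn_go_eq (s.length + 1) s [] [] (by omega)]
  simp [← splitDot_eta]

theorem matchDomain_eq_spec (known domain : String) :
    matchDomain known domain
      = specMatch (splitDot known.toList) (splitDot domain.toList) := by
  unfold matchDomain
  simp only [splitOn_eq_splitDot]
  by_cases h : (splitDot known.toList).length = (splitDot domain.toList).length
  · simp only [h, ne_eq, not_true_eq_false, if_false]
    simpa using loop_eq_spec _ _ h 0
  · simp [h, specMatch_ne_length h]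

-- ---------- B-side ----------

theorem dropWhile_ne_dot_bne (d : List Char) :
    d.dropWhile (· != '.') = d.dropWhile (· ≠ '.') := by
  induction d with
  | nil => rfl
  | cons c r ih =>
    by_cases hc : c = '.' <;> simp [List.dropWhile_cons, hc, ih]

theorem contains_dot_iff (d : List Char) :
    (d.contains '.') = !(d.dropWhile (· ≠ '.')).isEmpty := by
  induction d with
  | nil => rfl
  | cons c r ih =>
    by_cases hc : c = '.'
    · simp [hc]
    · simpa [List.dropWhile_cons, hc, Ne.symm hc, List.contains_cons] using ih

theorem specMatch_nil (b : List (List Char)) : specMatch [] b = b.isEmpty := by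
  cases b <;> rfl

theorem specMatch_left_nil (a : List (List Char)) : specMatch a [] = a.isEmpty := by
  cases a <;> rfl

theorem splitDot_isEmpty (s : List Char) : (splitDot s).isEmpty = false := by
  cases h : splitDot s with
  | nil => exact absurd h (splitDot_ne_nil s)
  | cons a t => rfl

theorem specMatch_single_nil (d : List Char) : specMatch [[]] (splitDot d) = d.isEmpty := by
  cases d with
  | nil => rfl
  | cons c r =>
    by_cases hc : c = '.'
    · subst hc
      rw [splitDot_dot]
      simp [specMatch, specMatch_nil, splitDot_isEmpty]
    · rw [splitDot_cons hc]
      simp [specMatch]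

theorem nil_false_case (d : List Char) :
    d.isEmpty = ((([] : List Char).takeWhile (· ≠ '.') == d.takeWhile (· ≠ '.')) &&
      specMatch (splitDot []).tail (splitDot d).tail) := by
  cases d with
  | nil => rfl
  | cons c r =>
    by_cases hc : c = '.'
    · subst hc
      rw [splitDot_dot]
      simp [List.takeWhile_cons, splitDot_nil, specMatch_nil, splitDot_isEmpty]
    · rw [splitDot_cons hc]
      simp [List.takeWhile_cons, hc, splitDot_nil]

theorem specMatch_star (d : List Char) :
    specMatch [['*']] (splitDot d) = (d.dropWhile (· ≠ '.')).isEmpty := by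
  cases hdw : d.dropWhile (· ≠ '.') with
  | nil =>
    have ht2 : (splitDot d).tail = [] := by rw [splitDot_tail, hdw]
    rw [splitDot_eta d]
    simp [specMatch, specMatch_nil, ht2]
  | cons x r =>
    have ht2 : (splitDot d).tail = splitDot r := by rw [splitDot_tail, hdw]
    rw [splitDot_eta d]
    simp [specMatch, specMatch_nil, ht2, splitDot_isEmpty]

theorem specMatch_star_cons (kr : List (List Char)) (d : List Char) :
    specMatch (['*'] :: kr) (splitDot d) = specMatch kr (splitDot d).tail := by
  rw [splitDot_eta d]
  simp [specMatch]

theorem specMatch_expand (k d : List Char)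
    (hnw : (k.takeWhile (· ≠ '.') == ['*']) = false) :
    specMatch (splitDot k) (splitDot d)
      = ((k.takeWhile (· ≠ '.') == d.takeWhile (· ≠ '.')) &&
         specMatch (splitDot k).tail (splitDot d).tail) := by
  rw [splitDot_eta k, splitDot_eta d]
  simp only [specMatch, List.tail_cons, splitDot_headI]
  rw [hnw]
  simp

theorem scanB_cons (start : Bool) (c : Char) (ks d : List Char) :
    scanB start (c :: ks) d =
      if start && c == '*' && (ks.isEmpty || ks.head? == some '.') then
        match ks with
        | [] => !(d.contains '.')
        | _ :: ks' =>
          match d.dropWhile (· != '.') with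
          | [] => false
          | _ :: d' => scanB true ks' d'
      else
        match d with
        | [] => false
        | c' :: d' => if c == c' then scanB (c == '.') ks d' else false := by
  rw [scanB.eq_def]

-- the scan, at a label start, computes the label-wise matcher
theorem scanB_eq_spec :
    ∀ (n : Nat) (k d : List Char), k.length ≤ n →
      (scanB true k d = specMatch (splitDot k) (splitDot d)) ∧
      (scanB false k d
        = ((k.takeWhile (· ≠ '.') == d.takeWhile (· ≠ '.')) &&
           specMatch (splitDot k).tail (splitDot d).tail)) := by
  intro n
  induction n with
  | zero =>
    intro k d hk
    have hk0 : k = [] := List.eq_nil_of_length_eq_zero (by omega)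
    subst hk0
    constructor
    · show d.isEmpty = specMatch [[]] (splitDot d)
      exact (specMatch_single_nil d).symm
    · show d.isEmpty = _
      exact nil_false_case d
  | succ m ih =>
    intro k d hk
    cases k with
    | nil =>
      constructor
      · show d.isEmpty = specMatch [[]] (splitDot d)
        exact (specMatch_single_nil d).symm
      · show d.isEmpty = _
        exact nil_false_case d
    | cons c ks =>
      have hks : ks.length ≤ m := by simp at hk; omega
      -- the literal branch used by both starts
      have lit : (match d with
                  | [] => false
                  | c' :: d' => if c == c' then scanB (c == '.') ks d' else false)
          = (((c :: ks).takeWhile (· ≠ '.') == d.takeWhile (· ≠ '.')) &&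
             specMatch (splitDot (c :: ks)).tail (splitDot d).tail) := by
        cases d with
        | nil =>
          by_cases hc : c = '.'
          · subst hc
            rw [splitDot_dot]
            simp [List.takeWhile_cons, splitDot_nil, specMatch_left_nil, splitDot_isEmpty]
          · rw [splitDot_cons hc, splitDot_nil]
            simp [List.takeWhile_cons, hc]
        | cons c' d' =>
          by_cases hcc : c = c'
          · subst hcc
            by_cases hc : c = '.'
            · subst hc
              rw [splitDot_dot, splitDot_dot]
              simpa [List.takeWhile_cons] using (ih ks d' hks).1
            · rw [splitDot_cons hc, splitDot_cons hc]
              have hcb : (c == '.') = false := beq_eq_false_iff_ne.mpr hc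
              simp [hcb, (ih ks d' hks).2, List.takeWhile_cons, hc, beq_iff_eq,
                    List.cons_eq_cons]
          · by_cases hc : c = '.' <;> by_cases hc' : c' = '.'
            · exact absurd (hc.trans hc'.symm) hcc
            · subst hc
              rw [splitDot_dot]
              simp [List.takeWhile_cons, hc', Ne.symm hcc, hcc]
            · subst hc'
              rw [splitDot_cons hc]
              simp [List.takeWhile_cons, hc, hcc]
            · rw [splitDot_cons hc]
              simp [List.takeWhile_cons, hc, hc', hcc]
      constructor
      · -- start = true
        rw [scanB_cons]
        by_cases hw : (true && c == '*' && (ks.isEmpty || ks.head? == some '.')) = true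
        · rw [if_pos hw]
          have hc : c = '*' := by simp at hw; tauto
          subst hc
          cases ks with
          | nil =>
            show (!(d.contains '.')) = specMatch (splitDot ['*']) (splitDot d)
            have h1 : splitDot ['*'] = [['*']] := rfl
            rw [h1, specMatch_star, contains_dot_iff]
            simp
          | cons k1 ks' =>
            have hk1 : k1 = '.' := by simp at hw; tauto
            subst hk1
            show (match d.dropWhile (· != '.') with
                  | [] => false
                  | _ :: d' => scanB true ks' d') = _
            rw [dropWhile_ne_dot_bne]
            have hsp : splitDot ('*' :: '.' :: ks') = ['*'] :: splitDot ks' := rfl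
            rw [hsp, specMatch_star_cons]
            cases hdw : d.dropWhile (· ≠ '.') with
            | nil =>
              have ht2 : (splitDot d).tail = [] := by rw [splitDot_tail, hdw]
              rw [ht2]
              simp [specMatch_left_nil, splitDot_isEmpty]
            | cons x r =>
              have ht2 : (splitDot d).tail = splitDot r := by rw [splitDot_tail, hdw]
              rw [ht2]
              have hks' : ks'.length ≤ m := by simp at hk; omega
              exact (ih ks' r hks').1
        · rw [if_neg hw, lit]
          have hnw : ((c :: ks).takeWhile (· ≠ '.') == ['*']) = false := by
            by_cases hc : c = '.'
            · subst hc; simp [List.takeWhile_cons]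
            · by_cases hcs : c = '*'
              · subst hcs
                simp only [Bool.true_and, beq_self_eq_true] at hw
                cases ks with
                | nil => simp at hw
                | cons k1 ks' =>
                  have hk1 : k1 ≠ '.' := by simpa using hw
                  simp [List.takeWhile_cons, hk1]
              · simp [List.takeWhile_cons, hc, hcs]
          rw [specMatch_expand (c :: ks) d hnw]
      · -- start = false
        rw [scanB_cons]
        rw [if_neg (by simp)]
        exact lit

-- ===== VERDICT (by name: the statement is the Claim_ definition above) =====
theorem matchDomain_spec : Claim_equal_matchDomain := by
  intro known domain _
  unfold Spec_matchDomain matchDomain_alt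
  rw [matchDomain_eq_spec]
  exact ((scanB_eq_spec known.toList.length known.toList domain.toList le_rfl).1).symm
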